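-- pv_equiv track=rewrite | github.com/GiammaFer75/Proteogenome_3 | Proteogenome3/pg_test.py | dummy_peptides
-- ===== SOURCE A (Python) =====
-- def dummy_peptides(prot_sequence, pep_min_length, pep_max_length):
--     """
--     Version: 1.0
--
--     Name History: dummy_peptides
--
--     INPUT :
--
--     OUTPUT:
--     """
--
--     prot_sequence = prot_sequence.replace('\n', '')
--     prot_sequence = prot_sequence.replace('K', '|')  # LYSINE
--     prot_sequence = prot_sequence.replace('R', '|')  # ARGININE
--
--     new_peptides = prot_sequence.split('|')  # The protein sequence is now a list of peptides
--
--     peptides = []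
--     for pep in new_peptides:  # Filter the peptides with the lenght raange
--         if (len(pep) >= pep_min_length) & (len(pep) <= pep_max_length):
--             peptides.append(pep)
--
--     return peptides
-- ===== SOURCE B (Python) =====
-- def dummy_peptides(prot_sequence, pep_min_length, pep_max_length):
--     # Single pass over the characters: drop '\n', cut at K, R (and at the
--     # literal '|' A uses as its split sentinel), keep in-range segments.
--     peptides = []
--     buf = []
--     for c in prot_sequence:
--         if c == '\n':
--             continue
--         if c in 'KR|':
--             if pep_min_length <= len(buf) <= pep_max_length:
--                 peptides.append(''.join(buf))
--             buf = []
--         else: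
--             buf.append(c)
--     if pep_min_length <= len(buf) <= pep_max_length:
--         peptides.append(''.join(buf))
--     return peptides
-- ===== Notes on version B (the rewrite author's own statement) =====
-- stated objective: alternative
-- what changed: Replaces A's four-pass replace/replace/replace/split-then-filter pipeline by a single character pass maintaining a current-peptide buffer that is flushed (with the length test) at each cut point and once at the end.
import Mathlib
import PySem

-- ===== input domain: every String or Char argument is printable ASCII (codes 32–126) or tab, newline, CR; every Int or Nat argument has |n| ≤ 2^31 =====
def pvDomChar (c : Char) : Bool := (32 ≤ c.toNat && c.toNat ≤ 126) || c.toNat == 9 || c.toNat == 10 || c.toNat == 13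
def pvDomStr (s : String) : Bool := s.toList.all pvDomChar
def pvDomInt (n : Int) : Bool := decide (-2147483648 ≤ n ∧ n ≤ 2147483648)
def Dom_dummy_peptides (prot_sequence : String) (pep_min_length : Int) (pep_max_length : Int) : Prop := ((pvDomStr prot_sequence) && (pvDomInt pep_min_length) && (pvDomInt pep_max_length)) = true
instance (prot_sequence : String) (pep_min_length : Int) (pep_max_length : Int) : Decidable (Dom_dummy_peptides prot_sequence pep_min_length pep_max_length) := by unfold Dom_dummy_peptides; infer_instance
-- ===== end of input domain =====

-- B replaces A's replace/replace/replace/split/filter pipeline by one character pass with a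
-- peptide buffer flushed at each cut point (K, R, and the '|' A uses as its split sentinel); objective: alternative.


-- ===== PORT A =====
def dummy_peptides (prot_sequence : String) (pep_min_length : Int) (pep_max_length : Int) : List String :=
  let s1 := PySem.Str.replace prot_sequence "\n" ""
  let s2 := PySem.Str.replace s1 "K" "|"
  let s3 := PySem.Str.replace s2 "R" "|"
  let new_peptides := (PySem.Chars.splitOn s3.toList "|".toList).map String.ofList
  new_peptides.foldl
    (fun peptides pep =>
      if pep_min_length ≤ PySem.Str.len pep ∧ PySem.Str.len pep ≤ pep_max_length then
        peptides ++ [pep]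
      else peptides)
    []

-- ===== PORT B =====
-- single pass; state = (current buffer, output so far); the flush tests the length range
def dpGo (pep_min_length pep_max_length : Int) : List Char → List Char → List String → List String
  | [], buf, acc =>
      if pep_min_length ≤ (buf.length : Int) ∧ (buf.length : Int) ≤ pep_max_length then
        acc ++ [String.ofList buf]
      else acc
  | c :: rest, buf, acc =>
      if c = '\n' then dpGo pep_min_length pep_max_length rest buf acc
      else if c = 'K' ∨ c = 'R' ∨ c = '|' then
        dpGo pep_min_length pep_max_length rest []
          (if pep_min_length ≤ (buf.length : Int) ∧ (buf.length : Int) ≤ pep_max_length then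
            acc ++ [String.ofList buf]
          else acc)
      else dpGo pep_min_length pep_max_length rest (buf ++ [c]) acc

def dummy_peptides_alt (prot_sequence : String) (pep_min_length : Int) (pep_max_length : Int) : List String :=
  dpGo pep_min_length pep_max_length prot_sequence.toList [] []

-- ===== PRECONDITION & SPEC =====
def Spec_dummy_peptides (prot_sequence : String) (pep_min_length : Int) (pep_max_length : Int) (out : List String) : Prop := out = dummy_peptides_alt prot_sequence pep_min_length pep_max_length
instance (prot_sequence : String) (pep_min_length : Int) (pep_max_length : Int) (out : List String) : Decidable (Spec_dummy_peptides prot_sequence pep_min_length pep_max_length out) := by unfold Spec_dummy_peptides; infer_instance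

-- ===== CLAIM (what is proved, stated in full; the proofs are below) =====
def Claim_equal_dummy_peptides : Prop := ∀ (prot_sequence : String) (pep_min_length : Int) (pep_max_length : Int), Dom_dummy_peptides prot_sequence pep_min_length pep_max_length → Spec_dummy_peptides prot_sequence pep_min_length pep_max_length (dummy_peptides prot_sequence pep_min_length pep_max_length)

-- ===== LEMMAS AND PROOFS =====

-- single-char `str.replace` is a flatMap over the characters
theorem replace_go_single (x : Char) (new : List Char) :
    ∀ (l : List Char) (fuel : Nat) (acc : List Char), l.length ≤ fuel →
      PySem.Chars.replace.go [x] new fuel l acc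
        = acc.reverse ++ l.flatMap (fun c => if c = x then new else [c]) := by
  intro l
  induction l with
  | nil =>
    intro fuel acc h
    cases fuel <;> simp [PySem.Chars.replace.go]
  | cons c t ih =>
    intro fuel acc h
    cases fuel with
    | zero => simp at h
    | succ f =>
      simp only [PySem.Chars.replace.go]
      by_cases hc : c = x
      · have hp : List.isPrefixOf [x] (c :: t) = true := by
          simp [List.isPrefixOf, hc]
        rw [if_pos hp]
        subst hc
        have ht : t.length ≤ f := by simpa using h
        rw [show List.drop [c].length (c :: t) = t from rfl, ih f (new.reverse ++ acc) ht]
        simp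
      · have hp : List.isPrefixOf [x] (c :: t) = false := by
          simp [List.isPrefixOf]
          intro hxc; exact absurd hxc.symm hc
        rw [if_neg (by simp [hp])]
        have ht : t.length ≤ f := by simpa using h
        rw [ih f (c :: acc) ht]
        simp [hc]

-- single-char `str.split` as a simple structural recursion
def pySplit1 (d : Char) : List Char → List Char → List (List Char)
  | [], cur => [cur.reverse]
  | c :: t, cur => if c = d then cur.reverse :: pySplit1 d t [] else pySplit1 d t (c :: cur)

theorem splitOn_go_single (d : Char) :
    ∀ (l : List Char) (fuel : Nat) (cur : List Char) (acc : List (List Char)),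
      l.length < fuel →
      PySem.Chars.splitOn.go [d] fuel l cur acc = acc.reverse ++ pySplit1 d l cur := by
  intro l
  induction l with
  | nil =>
    intro fuel cur acc h
    cases fuel with
    | zero => omega
    | succ f => simp [PySem.Chars.splitOn.go, pySplit1]
  | cons c t ih =>
    intro fuel cur acc h
    cases fuel with
    | zero => omega
    | succ f =>
      simp only [PySem.Chars.splitOn.go]
      by_cases hc : c = d
      · have hp : List.isPrefixOf [d] (c :: t) = true := by simp [List.isPrefixOf, hc]
        rw [if_pos hp]
        subst hc
        have ht : t.length < f := by simp at h; omega
        rw [show List.drop [c].length (c :: t) = t from rfl, ih f [] (cur.reverse :: acc) ht]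
        simp [pySplit1]
      · have hp : List.isPrefixOf [d] (c :: t) = false := by
          simp [List.isPrefixOf]
          intro hxc; exact absurd hxc.symm hc
        rw [if_neg (by simp [hp])]
        have ht : t.length < f := by simp at h; omega
        rw [ih f (c :: cur) acc ht]
        simp [pySplit1, hc]

-- the flush step both programs share, and the K/R→'|' substitution A's replaces perform
def pvFlush (mn mx : Int) (acc : List String) (p : List Char) : List String :=
  if mn ≤ (p.length : Int) ∧ (p.length : Int) ≤ mx then acc ++ [String.ofList p] else acc

def pvSubst (c : Char) : Char := if c = 'K' ∨ c = 'R' then '|' else c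

-- B's single pass computes the fold of the flush over the single-char split of the cleaned sequence
theorem dpGo_eq (mn mx : Int) :
    ∀ (l buf : List Char) (acc : List String),
      dpGo mn mx l buf acc
        = (pySplit1 '|' ((l.filter (fun c => !(c = '\n'))).map pvSubst) buf.reverse).foldl
            (pvFlush mn mx) acc := by
  intro l
  induction l with
  | nil => intro buf acc; simp [dpGo, pySplit1, pvFlush]
  | cons c t ih =>
    intro buf acc
    by_cases hn : c = '\n'
    · simp [dpGo, hn, ih]
    · by_cases hk : c = 'K' ∨ c = 'R' ∨ c = '|'
      · have hs : pvSubst c = '|' := by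
          rcases hk with h|h|h <;> simp [pvSubst, h]
        rw [show dpGo mn mx (c :: t) buf acc
            = dpGo mn mx t [] (pvFlush mn mx acc buf) from by
          simp [dpGo, hn, hk, pvFlush]]
        rw [ih]
        simp [hn, hs, pySplit1, pvFlush]
      · have hs : pvSubst c = c := by
          unfold pvSubst
          rw [if_neg]
          rintro (h|h) <;> exact hk (by tauto)
        have hd : ¬ c = '|' := fun h => hk (Or.inr (Or.inr h))
        rw [show dpGo mn mx (c :: t) buf acc = dpGo mn mx t (buf ++ [c]) acc from by
          simp [dpGo, hn, hk]]
        rw [ih]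
        simp [hn, hs, hd, pySplit1]

theorem flatMap_del (x : Char) (l : List Char) :
    l.flatMap (fun c => if c = x then [] else [c]) = l.filter (fun c => !(c = x)) := by
  induction l with
  | nil => rfl
  | cons c t ih => by_cases hc : c = x <;> simp [hc, ih]

theorem flatMap_sub (x y : Char) (l : List Char) :
    l.flatMap (fun c => if c = x then [y] else [c]) = l.map (fun c => if c = x then y else c) := by
  induction l with
  | nil => rfl
  | cons c t ih => by_cases hc : c = x <;> simp [hc, ih]

-- A's three replaces compute the newline-filtered, K/R-substituted character list
theorem a_pipeline (s : List Char) :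
    PySem.Chars.replace
        (PySem.Chars.replace (PySem.Chars.replace s ['\n'] []) ['K'] ['|']) ['R'] ['|']
      = (s.filter (fun c => !(c = '\n'))).map pvSubst := by
  have key : ∀ (l : List Char) (x : Char) (new : List Char),
      PySem.Chars.replace l [x] new = l.flatMap (fun c => if c = x then new else [c]) := by
    intro l x new
    unfold PySem.Chars.replace
    rw [if_neg (by simp)]
    rw [replace_go_single x new l l.length [] (le_refl _)]
    simp
  rw [key, key, key, flatMap_del, flatMap_sub, flatMap_sub, List.map_map]
  congr 1
  funext c
  by_cases hK : c = 'K'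
  · simp [hK, pvSubst, Function.comp]
  · by_cases hR : c = 'R' <;> simp [hK, hR, pvSubst, Function.comp]

-- ===== VERDICT (by name: the statement is the Claim_ definition above) =====
theorem dummy_peptides_spec : Claim_equal_dummy_peptides := by
  intro s mn mx _
  unfold Spec_dummy_peptides dummy_peptides dummy_peptides_alt
  have h3 : (PySem.Str.replace (PySem.Str.replace (PySem.Str.replace s "\n" "") "K" "|") "R" "|").toList
      = (s.toList.filter (fun c => !(c = '\n'))).map pvSubst := by
    simp only [PySem.Str.toList_replace]
    exact a_pipeline s.toList
  simp only [h3]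
  rw [show ("|" : String).toList = ['|'] from rfl]
  unfold PySem.Chars.splitOn
  rw [splitOn_go_single '|' _ _ [] [] (by omega)]
  rw [dpGo_eq]
  simp [List.foldl_map, PySem.Str.len_eq]
  rfl
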